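-- pv_equiv track=rewrite | github.com/LinkaiShao/Categorizer | TestingLangTokenize/EnglishTokenize.py | custom_tokenizer
-- ===== SOURCE A (Python) =====
-- def custom_tokenizer(text):
--     tokens = []
--     current_token = ""
--
--     for char in text:
--         if char.isalpha():
--             current_token += char
--         else:
--             if current_token:
--                 tokens.append(current_token)
--             current_token = ""
--
--     if current_token:
--         tokens.append(current_token)
--
--     return tokens
-- ===== SOURCE B (Python) =====
-- def custom_tokenizer(text):
--     flags = [c.isalpha() for c in text]
--     starts = [i for i, (cur, prev) in enumerate(zip(flags, [False] + flags)) if cur and not prev]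
--     ends = [j for j, (cur, nxt) in enumerate(zip(flags, flags[1:] + [False])) if cur and not nxt]
--     return [text[i:j + 1] for i, j in zip(starts, ends)]
-- ===== Notes on version B (the rewrite author's own statement) =====
-- stated objective: alternative
-- what changed: Replaces A's sequential accumulator state machine by stateless boundary detection: an alpha-flag list is zipped with shifted copies of itself to find run starts and run ends independently, which are then paired and used to slice the tokens out of the text.
import Mathlib
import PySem

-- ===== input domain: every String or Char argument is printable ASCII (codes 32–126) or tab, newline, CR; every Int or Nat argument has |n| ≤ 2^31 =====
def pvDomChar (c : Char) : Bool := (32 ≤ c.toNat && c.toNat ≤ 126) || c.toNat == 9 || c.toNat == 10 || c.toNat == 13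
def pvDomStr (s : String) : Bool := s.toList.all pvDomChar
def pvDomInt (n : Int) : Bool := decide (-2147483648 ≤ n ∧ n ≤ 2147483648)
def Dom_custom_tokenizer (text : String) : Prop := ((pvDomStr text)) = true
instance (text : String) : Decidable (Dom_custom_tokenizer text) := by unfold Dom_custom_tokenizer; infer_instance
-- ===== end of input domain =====

-- B replaces A's sequential accumulator state machine by stateless boundary
-- detection: run starts and run ends are found independently by zipping the
-- alpha-flag list with shifted copies, then paired and sliced; same O(n) cost.

-- ===== PORT A =====
-- state: (tokens, current_token); current_token kept as List Char (Python string concatenation char by char)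
def custom_tokenizer (text : String) : List String :=
  let st := text.toList.foldl
    (fun (s : List String × List Char) c =>
      if PySem.Chars.isalpha c then (s.1, s.2 ++ [c])
      else if s.2 ≠ [] then (s.1 ++ [String.ofList s.2], ([] : List Char))
      else (s.1, []))
    ([], [])
  if st.2 ≠ [] then st.1 ++ [String.ofList st.2] else st.1

-- ===== PORT B =====
-- flags = [c.isalpha() for c in text]; starts/ends from enumerate(zip(flags, shifted)); tokens by slicing
def custom_tokenizer_alt (text : String) : List String :=
  let flags := text.toList.map PySem.Chars.isalpha
  let starts := ((PySem.List.enumerate (flags.zip (false :: flags)) 0).filter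
      (fun p => p.2.1 && !p.2.2)).map (fun p => p.1)
  let ends := ((PySem.List.enumerate
      (flags.zip (PySem.List.slice flags (some 1) none ++ [false])) 0).filter
      (fun p => p.2.1 && !p.2.2)).map (fun p => p.1)
  (starts.zip ends).map (fun p => PySem.Str.slice text (some p.1) (some (p.2 + 1)))

-- ===== PRECONDITION & SPEC =====
def Spec_custom_tokenizer (text : String) (out : List String) : Prop := out = custom_tokenizer_alt text
instance (text : String) (out : List String) : Decidable (Spec_custom_tokenizer text out) := by unfold Spec_custom_tokenizer; infer_instance

-- ===== CLAIM (what is proved, stated in full; the proofs are below) =====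
def Claim_equal_custom_tokenizer : Prop := ∀ (text : String), Dom_custom_tokenizer text → Spec_custom_tokenizer text (custom_tokenizer text)

-- ===== LEMMAS AND PROOFS =====

-- proof-only bridge: the maximal alphabetic runs of a char list
def pvRuns : List Char → List String
  | [] => []
  | c :: rest =>
    if PySem.Chars.isalpha c then
      String.ofList (c :: rest.takeWhile PySem.Chars.isalpha)
        :: pvRuns (rest.dropWhile PySem.Chars.isalpha)
    else pvRuns rest
termination_by l => l.length
decreasing_by
  · exact Nat.lt_succ_of_le (List.length_dropWhile_le _ _)
  · exact Nat.lt_succ_self _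

-- ---------- A-side: the state machine computes pvRuns ----------

-- A's remaining computation from a pending current_token `cur`
def pvAux (cur : List Char) : List Char → List String
  | [] => if cur = [] then [] else [String.ofList cur]
  | c :: rest =>
    if PySem.Chars.isalpha c then pvAux (cur ++ [c]) rest
    else if cur = [] then pvAux [] rest
    else String.ofList cur :: pvAux [] rest

def pvStepA (s : List String × List Char) (c : Char) : List String × List Char :=
  if PySem.Chars.isalpha c then (s.1, s.2 ++ [c])
  else if s.2 ≠ [] then (s.1 ++ [String.ofList s.2], ([] : List Char))
  else (s.1, [])

def pvFinA (s : List String × List Char) : List String :=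
  if s.2 ≠ [] then s.1 ++ [String.ofList s.2] else s.1

theorem pvFold_eq_aux (l : List Char) : ∀ (toks : List String) (cur : List Char),
    pvFinA (l.foldl pvStepA (toks, cur)) = toks ++ pvAux cur l := by
  induction l with
  | nil =>
    intro toks cur
    simp only [List.foldl_nil, pvFinA, pvAux]
    by_cases h : cur = [] <;> simp [h]
  | cons c rest ih =>
    intro toks cur
    simp only [List.foldl_cons, pvAux]
    by_cases ha : PySem.Chars.isalpha c = true
    · simp [pvStepA, ha, ih]
    · by_cases hc : cur = []
      · simp [pvStepA, ha, hc, ih]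
      · simp [pvStepA, ha, hc, ih]

theorem pvAux_pending (l : List Char) : ∀ (cur : List Char), cur ≠ [] →
    pvAux cur l = String.ofList (cur ++ l.takeWhile PySem.Chars.isalpha)
      :: pvAux [] (l.dropWhile PySem.Chars.isalpha) := by
  induction l with
  | nil => intro cur h; simp [pvAux, h]
  | cons c rest ih =>
    intro cur h
    by_cases ha : PySem.Chars.isalpha c = true
    · simp only [pvAux, ha, if_pos, List.takeWhile_cons, List.dropWhile_cons]
      rw [ih (cur ++ [c]) (by simp)]
      simp [ha]
    · simp [pvAux, ha, h]

theorem pvAux_nil_eq : ∀ (n : Nat) (l : List Char), l.length ≤ n →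
    pvAux [] l = pvRuns l := by
  intro n
  induction n with
  | zero =>
    intro l hl
    have : l = [] := List.eq_nil_of_length_eq_zero (Nat.le_zero.mp hl)
    subst this; simp [pvAux, pvRuns]
  | succ n ih =>
    intro l hl
    cases l with
    | nil => simp [pvAux, pvRuns]
    | cons c rest =>
      by_cases ha : PySem.Chars.isalpha c = true
      · have h1 : pvAux ([] : List Char) (c :: rest) = pvAux [c] rest := by
          simp [pvAux, ha]
        rw [h1, pvAux_pending rest [c] (by simp)]
        rw [pvRuns]
        simp only [ha, if_pos]
        rw [ih (rest.dropWhile PySem.Chars.isalpha)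
          (le_trans (List.length_dropWhile_le _ _) (Nat.le_of_succ_le_succ hl))]
        simp
      · have h1 : pvAux ([] : List Char) (c :: rest) = pvAux [] rest := by
          simp [pvAux, ha]
        rw [h1, pvRuns]
        simp only [ha]
        rw [ih rest (Nat.le_of_succ_le_succ hl)]
        simp [pvRuns, ha]

theorem pvA_eq_runs (text : String) : custom_tokenizer text = pvRuns text.toList := by
  unfold custom_tokenizer
  change pvFinA (text.toList.foldl pvStepA ([], [])) = _
  rw [pvFold_eq_aux, List.nil_append,
    pvAux_nil_eq text.toList.length text.toList (le_refl _)]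

-- ---------- B-side: boundary detection computes pvRuns ----------

-- generalized start/end index lists, over an offset `s` and (for starts) the flag before the list
def pvStarts (l : List Char) (s : Int) (prev : Bool) : List Int :=
  ((PySem.List.enumerate
      ((l.map PySem.Chars.isalpha).zip (prev :: l.map PySem.Chars.isalpha)) s).filter
    (fun p => p.2.1 && !p.2.2)).map (fun p => p.1)

def pvEnds (l : List Char) (s : Int) : List Int :=
  ((PySem.List.enumerate
      ((l.map PySem.Chars.isalpha).zip
        (PySem.List.slice (l.map PySem.Chars.isalpha) (some 1) none ++ [false])) s).filter
    (fun p => p.2.1 && !p.2.2)).map (fun p => p.1)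

-- the run intervals (start index, end index), absolute offsets
def pvRunIv : List Char → Int → List (Int × Int)
  | [], _ => []
  | c :: rest, s =>
    if PySem.Chars.isalpha c then
      (s, s + (rest.takeWhile PySem.Chars.isalpha).length)
        :: pvRunIv (rest.dropWhile PySem.Chars.isalpha)
             (s + (rest.takeWhile PySem.Chars.isalpha).length + 1)
    else pvRunIv rest (s + 1)
termination_by l => l.length
decreasing_by
  · exact Nat.lt_succ_of_le (List.length_dropWhile_le _ _)
  · exact Nat.lt_succ_self _

theorem pvStarts_peel (c : Char) (rest : List Char) (s : Int) (prev : Bool) :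
    pvStarts (c :: rest) s prev =
      (if PySem.Chars.isalpha c && !prev then [s] else []) ++
        pvStarts rest (s + 1) (PySem.Chars.isalpha c) := by
  simp only [pvStarts, List.map_cons, List.zip_cons_cons, PySem.List.enumerate_cons,
    List.filter_cons]
  by_cases h : (PySem.Chars.isalpha c && !prev) = true <;> simp [h]

theorem pvEnds_peel (c : Char) (rest : List Char) (s : Int) :
    pvEnds (c :: rest) s =
      (if PySem.Chars.isalpha c &&
          !((rest.map PySem.Chars.isalpha).headD false) then [s] else []) ++
        pvEnds rest (s + 1) := by
  simp only [pvEnds, PySem.List.slice_from_one, List.map_cons, List.tail_cons]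
  cases rest with
  | nil =>
    simp only [List.map_nil, List.nil_append, List.zip_cons_cons, List.zip_nil_left,
      PySem.List.enumerate_cons, PySem.List.enumerate_nil, List.filter_cons, List.headD_nil]
    by_cases h : (PySem.Chars.isalpha c && !false) = true <;> simp_all
  | cons d r =>
    simp only [List.map_cons, List.cons_append, List.zip_cons_cons,
      PySem.List.enumerate_cons, List.filter_cons, List.headD_cons, List.tail_cons]
    by_cases h : (PySem.Chars.isalpha c && !PySem.Chars.isalpha d) = true <;> simp [h]

-- inside a run, with prev = true, fully-alphabetic prefixes contribute no starts
theorem pvStarts_run (t : List Char) : ∀ (d : List Char) (s : Int),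
    (∀ c ∈ t, PySem.Chars.isalpha c = true) →
    pvStarts (t ++ d) s true = pvStarts d (s + t.length) true := by
  induction t with
  | nil => intro d s _; simp
  | cons c t' ih =>
    intro d s h
    have hc := h c (List.mem_cons_self)
    rw [List.cons_append, pvStarts_peel, hc]
    simp only [Bool.not_true, Bool.and_false, if_false, List.nil_append,
      Bool.false_eq_true, reduceIte]
    rw [ih d (s + 1) (fun x hx => h x (List.mem_cons_of_mem _ hx))]
    have h1 : s + 1 + ((t' : List Char).length : Int) = s + ((c :: t').length : Int) := by
      push_cast [List.length_cons]; ring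
    rw [h1]

-- if the head of d is not alphabetic (or d = []), prev does not matter
theorem pvStarts_prev_irrel (d : List Char) (s : Int)
    (h : ∀ c ∈ d.head?, PySem.Chars.isalpha c = false) :
    pvStarts d s true = pvStarts d s false := by
  cases d with
  | nil => simp [pvStarts]
  | cons c r =>
    have hc : PySem.Chars.isalpha c = false := h c (by simp)
    rw [pvStarts_peel, pvStarts_peel, hc]
    simp

-- a nonempty fully-alphabetic run followed by a non-alphabetic (or no) char
theorem pvEnds_run (t : List Char) : ∀ (d : List Char) (s : Int), t ≠ [] →
    (∀ c ∈ t, PySem.Chars.isalpha c = true) →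
    (∀ c ∈ d.head?, PySem.Chars.isalpha c = false) →
    pvEnds (t ++ d) s = (s + t.length - 1) :: pvEnds d (s + t.length) := by
  induction t with
  | nil => intro d s h; exact absurd rfl h
  | cons c t' ih =>
    intro d s _ ht hd
    have hc := ht c (List.mem_cons_self)
    cases t' with
    | nil =>
      rw [List.cons_append, pvEnds_peel, hc]
      simp only [List.nil_append]
      have hh : ((d.map PySem.Chars.isalpha).headD false) = false := by
        cases d with
        | nil => simp
        | cons e r => simpa using hd e (by simp)
      simp only [hh]
      simp only [Bool.not_false, Bool.and_true, if_true, reduceIte,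
        List.singleton_append, List.length_cons, List.length_nil]
      norm_num
    | cons c2 t'' =>
      have hc2 := ht c2 (List.mem_cons_of_mem _ (List.mem_cons_self))
      rw [List.cons_append, pvEnds_peel]
      have hh : (((c2 :: t'' ++ d).map PySem.Chars.isalpha).headD false) = true := by
        simpa using hc2
      rw [hh, hc]
      simp only [Bool.not_true, Bool.and_false, Bool.false_eq_true, reduceIte,
        List.nil_append]
      rw [ih d (s + 1) (by simp) (fun x hx => ht x (List.mem_cons_of_mem _ hx)) hd]
      have h1 : s + 1 + ((c2 :: t'').length : Int) = s + ((c :: c2 :: t'').length : Int) := by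
        push_cast [List.length_cons]; ring
      rw [h1]

theorem pv_head_dropWhile (p : Char → Bool) (l : List Char) :
    ∀ c ∈ (l.dropWhile p).head?, p c = false := by
  induction l with
  | nil => simp
  | cons c r ih =>
    intro x hx
    rw [List.dropWhile_cons] at hx
    by_cases h : p c = true
    · rw [if_pos h] at hx; exact ih x hx
    · rw [if_neg h] at hx; simp at hx; subst hx
      exact Bool.eq_false_iff.mpr h

theorem pvStarts_eq : ∀ (n : Nat) (l : List Char), l.length ≤ n → ∀ (s : Int),
    pvStarts l s false = (pvRunIv l s).map (fun p => p.1) := by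
  intro n
  induction n with
  | zero =>
    intro l hl s
    have : l = [] := List.eq_nil_of_length_eq_zero (Nat.le_zero.mp hl)
    subst this; simp [pvStarts, pvRunIv]
  | succ n ih =>
    intro l hl s
    cases l with
    | nil => simp [pvStarts, pvRunIv]
    | cons c rest =>
      rw [pvStarts_peel]
      by_cases ha : PySem.Chars.isalpha c = true
      · rw [pvRunIv]
        simp only [ha, if_pos, Bool.not_false, Bool.and_true, Bool.true_and]
        have hsplit : rest = rest.takeWhile PySem.Chars.isalpha
            ++ rest.dropWhile PySem.Chars.isalpha := (List.takeWhile_append_dropWhile).symm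
        conv_lhs => rw [hsplit]
        rw [pvStarts_run _ _ _ (fun x hx => List.mem_takeWhile_imp hx),
          pvStarts_prev_irrel _ _ (pv_head_dropWhile _ rest),
          ih _ (le_trans (List.length_dropWhile_le _ _) (Nat.le_of_succ_le_succ hl))]
        have h1 : s + 1 + ((rest.takeWhile PySem.Chars.isalpha).length : Int)
            = s + ((rest.takeWhile PySem.Chars.isalpha).length : Int) + 1 := by ring
        rw [h1]
        simp
      · rw [pvRunIv]
        simp only [ha, Bool.false_and, Bool.false_eq_true, reduceIte,
          List.nil_append]
        exact ih rest (Nat.le_of_succ_le_succ hl) (s + 1)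

theorem pvEnds_eq : ∀ (n : Nat) (l : List Char), l.length ≤ n → ∀ (s : Int),
    pvEnds l s = (pvRunIv l s).map (fun p => p.2) := by
  intro n
  induction n with
  | zero =>
    intro l hl s
    have : l = [] := List.eq_nil_of_length_eq_zero (Nat.le_zero.mp hl)
    subst this; simp [pvEnds, pvRunIv]
  | succ n ih =>
    intro l hl s
    cases l with
    | nil => simp [pvEnds, pvRunIv]
    | cons c rest =>
      by_cases ha : PySem.Chars.isalpha c = true
      · rw [pvRunIv]
        simp only [ha, if_pos]
        have hsplit : c :: rest = (c :: rest.takeWhile PySem.Chars.isalpha)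
            ++ rest.dropWhile PySem.Chars.isalpha := by
          simp [List.takeWhile_append_dropWhile]
        rw [hsplit, pvEnds_run _ _ _ (by simp)
          (by intro x hx
              rcases List.mem_cons.mp hx with h | h
              · subst h; exact ha
              · exact List.mem_takeWhile_imp h)
          (pv_head_dropWhile _ rest),
          ih _ (le_trans (List.length_dropWhile_le _ _) (Nat.le_of_succ_le_succ hl))]
        have h1 : s + (((c :: rest.takeWhile PySem.Chars.isalpha).length : Nat) : Int)
            = s + ((rest.takeWhile PySem.Chars.isalpha).length : Int) + 1 := by
          push_cast [List.length_cons]; ring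
        rw [h1]
        have h2 : s + ((rest.takeWhile PySem.Chars.isalpha).length : Int) + 1 - 1
            = s + ((rest.takeWhile PySem.Chars.isalpha).length : Int) := by ring
        rw [h2]
        simp
      · rw [pvRunIv, pvEnds_peel]
        simp only [ha, Bool.false_and, Bool.false_eq_true, reduceIte, List.nil_append]
        exact ih rest (Nat.le_of_succ_le_succ hl) (s + 1)

-- slicing the original text at the run intervals yields the runs
theorem pvSlice_runIv : ∀ (n : Nat) (l : List Char), l.length ≤ n → ∀ (pre : List Char),
    (pvRunIv l (pre.length : Int)).map
        (fun p => String.ofList (PySem.List.slice (pre ++ l) (some p.1) (some (p.2 + 1))))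
      = pvRuns l := by
  intro n
  induction n with
  | zero =>
    intro l hl pre
    have : l = [] := List.eq_nil_of_length_eq_zero (Nat.le_zero.mp hl)
    subst this; simp [pvRunIv, pvRuns]
  | succ n ih =>
    intro l hl pre
    cases l with
    | nil => simp [pvRunIv, pvRuns]
    | cons c rest =>
      set t := rest.takeWhile PySem.Chars.isalpha with ht
      set d := rest.dropWhile PySem.Chars.isalpha with hd
      by_cases ha : PySem.Chars.isalpha c = true
      · rw [pvRunIv, pvRuns]
        simp only [ha, if_pos, List.map_cons]
        congr 1
        · -- head token: slice (pre ++ c :: rest) |pre| (|pre| + (|t|+1)) = c :: t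
          have h1 : (pre.length : Int) + (t.length : Int) + 1
              = (pre.length : Int) + ((t.length + 1 : Nat) : Int) := by push_cast; ring
          rw [h1, PySem.List.slice_natCast_add (pre ++ c :: rest) pre.length (t.length + 1)]
          congr 1
          rw [List.drop_left]
          have h2 : c :: rest = (c :: t) ++ d := by simp [ht, hd, List.takeWhile_append_dropWhile]
          rw [h2]
          have h3 : t.length + 1 = (c :: t).length := by simp
          rw [h3, List.take_left]
        · -- tail: recurse with pre' = pre ++ c :: t
          have hlen : ((pre ++ c :: t).length : Int)
              = (pre.length : Int) + (t.length : Int) + 1 := by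
            simp [List.length_append]; push_cast; ring
          have happ : pre ++ c :: rest = (pre ++ c :: t) ++ d := by
            simp [ht, hd, List.takeWhile_append_dropWhile]
          rw [happ, ← hlen,
            ih d (le_trans (List.length_dropWhile_le _ _) (Nat.le_of_succ_le_succ hl))
              (pre ++ c :: t)]
      · rw [pvRunIv, pvRuns]
        simp only [ha, if_neg, Bool.false_eq_true, not_false_iff]
        have hlen : ((pre ++ [c]).length : Int) = (pre.length : Int) + 1 := by
          simp
        have happ : pre ++ c :: rest = (pre ++ [c]) ++ rest := by simp
        rw [happ, ← hlen, ih rest (Nat.le_of_succ_le_succ hl) (pre ++ [c])]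

theorem pvB_eq_runs (text : String) : custom_tokenizer_alt text = pvRuns text.toList := by
  unfold custom_tokenizer_alt
  show ((pvStarts text.toList 0 false).zip (pvEnds text.toList 0)).map
      (fun p => PySem.Str.slice text (some p.1) (some (p.2 + 1))) = _
  rw [pvStarts_eq text.toList.length text.toList (le_refl _) 0,
    pvEnds_eq text.toList.length text.toList (le_refl _) 0,
    List.zip_map']
  simp only [List.map_map]
  have h0 : (0 : Int) = ((List.length ([] : List Char) : Nat) : Int) := by simp
  have := pvSlice_runIv text.toList.length text.toList (le_refl _) []
  rw [List.nil_append] at this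
  rw [h0, ← this]
  rfl

-- ===== VERDICT (by name: the statement is the Claim_ definition above) =====
theorem custom_tokenizer_spec : Claim_equal_custom_tokenizer := by
  intro text _
  unfold Spec_custom_tokenizer
  rw [pvA_eq_runs, pvB_eq_runs]
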